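-- pv_equiv track=rewrite | github.com/MADAO81/Codewars_tasks | 7 kyu/Alphabet war 7 kyu.py | alphabet_war
-- ===== SOURCE A (Python) =====
-- def alphabet_war(fight):
--     fighter_dict = {"w":-4, "p":-3, "b":-2, "s":-1,"m":4, "q":3, "d":2, "z":1}
--     result = 0
--     for ch in fight:
--         if ch in fighter_dict:
--             result += fighter_dict.get(ch)
--     if result > 0:
--         return "Right side wins!"
--     elif result < 0:
--         return "Left side wins!"
--     else:
--         return "Let's fight again!"
-- ===== SOURCE B (Python) =====
-- LEFT = {"w": 4, "p": 3, "b": 2, "s": 1}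
-- RIGHT = {"m": 4, "q": 3, "d": 2, "z": 1}
--
-- def alphabet_war(fight):
--     left = sum(LEFT.get(c, 0) for c in fight)
--     right = sum(RIGHT.get(c, 0) for c in fight)
--     if left < right:
--         return "Right side wins!"
--     if right < left:
--         return "Left side wins!"
--     return "Let's fight again!"
-- ===== Notes on version B (the rewrite author's own statement) =====
-- stated objective: alternative
-- what changed: A accumulates one signed total in a single scan over a combined signed-weight dict and branches on its sign; B scores the two armies separately with two positive-weight tables (one pass per side) and decides by comparing the two side totals directly.
import Mathlib
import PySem

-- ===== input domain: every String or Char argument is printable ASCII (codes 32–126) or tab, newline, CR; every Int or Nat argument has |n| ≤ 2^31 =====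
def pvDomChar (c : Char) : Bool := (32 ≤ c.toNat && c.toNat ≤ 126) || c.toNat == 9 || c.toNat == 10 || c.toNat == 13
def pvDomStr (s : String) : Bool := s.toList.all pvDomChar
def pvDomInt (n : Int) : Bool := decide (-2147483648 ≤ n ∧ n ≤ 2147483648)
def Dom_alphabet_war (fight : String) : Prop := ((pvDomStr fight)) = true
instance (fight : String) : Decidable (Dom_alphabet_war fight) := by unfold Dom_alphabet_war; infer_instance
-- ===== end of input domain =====

-- B scores the two armies separately with two positive-weight tables (one pass per side)
-- and compares the side totals, instead of A's single signed accumulation (alternative decomposition).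

-- ===== PORT A =====
def alphabet_war (fight : String) : String :=
  let fighter_dict : PySem.Dict Char Int :=
    PySem.Dict.ofList [('w', -4), ('p', -3), ('b', -2), ('s', -1), ('m', 4), ('q', 3), ('d', 2), ('z', 1)]
  let result : Int := fight.toList.foldl
    (fun result ch => if fighter_dict.contains ch then result + (fighter_dict.get? ch).getD 0 else result) 0
  if result > 0 then "Right side wins!"
  else if result < 0 then "Left side wins!"
  else "Let's fight again!"

-- ===== PORT B =====
-- module-level weight table of the left army (Source B's LEFT)
def pvLEFT : PySem.Dict Char Int := PySem.Dict.ofList [('w', 4), ('p', 3), ('b', 2), ('s', 1)]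
-- module-level weight table of the right army (Source B's RIGHT)
def pvRIGHT : PySem.Dict Char Int := PySem.Dict.ofList [('m', 4), ('q', 3), ('d', 2), ('z', 1)]

def alphabet_war_alt (fight : String) : String :=
  let left : Int := fight.toList.foldl (fun acc c => acc + pvLEFT.getD c 0) 0
  let right : Int := fight.toList.foldl (fun acc c => acc + pvRIGHT.getD c 0) 0
  if left < right then "Right side wins!"
  else if right < left then "Left side wins!"
  else "Let's fight again!"

-- ===== PRECONDITION & SPEC =====
def Spec_alphabet_war (fight : String) (out : String) : Prop := out = alphabet_war_alt fight
instance (fight : String) (out : String) : Decidable (Spec_alphabet_war fight out) := by unfold Spec_alphabet_war; infer_instance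

-- ===== CLAIM (what is proved, stated in full; the proofs are below) =====
def Claim_equal_alphabet_war : Prop := ∀ (fight : String), Dom_alphabet_war fight → Spec_alphabet_war fight (alphabet_war fight)

-- ===== LEMMAS AND PROOFS =====

-- the literal dicts in mk form, so the get?/contains simp lemmas apply
lemma dictA_eval :
    PySem.Dict.ofList [('w', (-4 : Int)), ('p', -3), ('b', -2), ('s', -1), ('m', 4), ('q', 3), ('d', 2), ('z', 1)]
    = PySem.Dict.mk [('w', -4), ('p', -3), ('b', -2), ('s', -1), ('m', 4), ('q', 3), ('d', 2), ('z', 1)] := by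
  decide

lemma left_eval : pvLEFT = PySem.Dict.mk [('w', 4), ('p', 3), ('b', 2), ('s', 1)] := by decide

lemma right_eval : pvRIGHT = PySem.Dict.mk [('m', 4), ('q', 3), ('d', 2), ('z', 1)] := by decide

-- A's loop as a closed expression over letter counts
lemma a_result (l : List Char) (r : Int) :
    l.foldl (fun result ch =>
      if (PySem.Dict.ofList [('w', (-4 : Int)), ('p', -3), ('b', -2), ('s', -1), ('m', 4), ('q', 3), ('d', 2), ('z', 1)]).contains ch
      then result + ((PySem.Dict.ofList [('w', (-4 : Int)), ('p', -3), ('b', -2), ('s', -1), ('m', 4), ('q', 3), ('d', 2), ('z', 1)]).get? ch).getD 0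
      else result) r
    = r - 4 * (l.count 'w' : Int) - 3 * (l.count 'p' : Int) - 2 * (l.count 'b' : Int) - (l.count 's' : Int)
      + 4 * (l.count 'm' : Int) + 3 * (l.count 'q' : Int) + 2 * (l.count 'd' : Int) + (l.count 'z' : Int) := by
  induction l generalizing r with
  | nil => simp
  | cons ch t ih =>
    rw [List.foldl_cons, ih]
    simp only [List.count_cons, dictA_eval]
    by_cases h1 : ch = 'w'
    · subst h1; simp [PySem.Dict.get?_mk_cons]; ring
    by_cases h2 : ch = 'p'
    · subst h2; simp [PySem.Dict.get?_mk_cons]; ring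
    by_cases h3 : ch = 'b'
    · subst h3; simp [PySem.Dict.get?_mk_cons]; ring
    by_cases h4 : ch = 's'
    · subst h4; simp [PySem.Dict.get?_mk_cons]; ring
    by_cases h5 : ch = 'm'
    · subst h5; simp [PySem.Dict.get?_mk_cons]; ring
    by_cases h6 : ch = 'q'
    · subst h6; simp [PySem.Dict.get?_mk_cons]; ring
    by_cases h7 : ch = 'd'
    · subst h7; simp [PySem.Dict.get?_mk_cons]; ring
    by_cases h8 : ch = 'z'
    · subst h8; simp [PySem.Dict.get?_mk_cons]; ring
    simp [Ne.symm h1, Ne.symm h2, Ne.symm h3, Ne.symm h4,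
      Ne.symm h5, Ne.symm h6, Ne.symm h7, Ne.symm h8, h1, h2, h3, h4, h5, h6, h7, h8]

-- B's left-army pass as a closed expression over letter counts
lemma b_left (l : List Char) (r : Int) :
    l.foldl (fun acc c => acc + pvLEFT.getD c 0) r
    = r + 4 * (l.count 'w' : Int) + 3 * (l.count 'p' : Int) + 2 * (l.count 'b' : Int) + (l.count 's' : Int) := by
  induction l generalizing r with
  | nil => simp
  | cons ch t ih =>
    rw [List.foldl_cons, ih]
    simp only [List.count_cons, left_eval]
    by_cases h1 : ch = 'w'
    · subst h1; simp [PySem.Dict.getD, PySem.Dict.get?_mk_cons]; ring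
    by_cases h2 : ch = 'p'
    · subst h2; simp [PySem.Dict.getD, PySem.Dict.get?_mk_cons]; ring
    by_cases h3 : ch = 'b'
    · subst h3; simp [PySem.Dict.getD, PySem.Dict.get?_mk_cons]; ring
    by_cases h4 : ch = 's'
    · subst h4; simp [PySem.Dict.getD, PySem.Dict.get?_mk_cons]; ring
    simp [PySem.Dict.getD, PySem.Dict.get?, Ne.symm h1, Ne.symm h2, Ne.symm h3, Ne.symm h4, h1, h2, h3, h4]

-- B's right-army pass as a closed expression over letter counts
lemma b_right (l : List Char) (r : Int) :
    l.foldl (fun acc c => acc + pvRIGHT.getD c 0) r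
    = r + 4 * (l.count 'm' : Int) + 3 * (l.count 'q' : Int) + 2 * (l.count 'd' : Int) + (l.count 'z' : Int) := by
  induction l generalizing r with
  | nil => simp
  | cons ch t ih =>
    rw [List.foldl_cons, ih]
    simp only [List.count_cons, right_eval]
    by_cases h1 : ch = 'm'
    · subst h1; simp [PySem.Dict.getD, PySem.Dict.get?_mk_cons]; ring
    by_cases h2 : ch = 'q'
    · subst h2; simp [PySem.Dict.getD, PySem.Dict.get?_mk_cons]; ring
    by_cases h3 : ch = 'd'
    · subst h3; simp [PySem.Dict.getD, PySem.Dict.get?_mk_cons]; ring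
    by_cases h4 : ch = 'z'
    · subst h4; simp [PySem.Dict.getD, PySem.Dict.get?_mk_cons]; ring
    simp [PySem.Dict.getD, PySem.Dict.get?, Ne.symm h1, Ne.symm h2, Ne.symm h3, Ne.symm h4, h1, h2, h3, h4]

-- ===== VERDICT (by name: the statement is the Claim_ definition above) =====
theorem alphabet_war_spec : Claim_equal_alphabet_war := by
  intro fight _
  unfold Spec_alphabet_war alphabet_war alphabet_war_alt
  simp only [a_result, b_left, b_right]
  split_ifs <;> first | rfl | omega
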